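-- pv_equiv track=rewrite | github.com/andrevar/my-codewars-katas-solutions | 6 kyu/How many feelings?.py | count_feelings
-- ===== SOURCE A (Python) =====
-- def count_feelings(s, arr):
--     c = 0
--     for i in arr:
--         t = 0
--         for j in i:
--             if s.count(j) < i.count(j):
--                 t = 1
--         if t == 0:
--             c += 1
--     if c == 1:
--         return '1 feeling.'
--     return str(c) + ' feelings.'
-- ===== SOURCE B (Python) =====
-- def count_feelings(s, arr):
--     ss = ''.join(sorted(s))
--     c = 0
--     for w in arr:
--         # two-pointer walk over the two sorted sequences: for each char of sorted(w),
--         # advance the pointer k through sorted s to the next occurrence and consume it;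
--         # this checks that sorted(w) is a subsequence of sorted(s).
--         k = 0
--         ok = True
--         for ch in sorted(w):
--             k = ss.find(ch, k)
--             if k == -1:
--                 ok = False
--                 break
--             k += 1
--         if ok:
--             c += 1
--     if c == 1:
--         return '1 feeling.'
--     return str(c) + ' feelings.'
-- ===== Notes on version B (the rewrite author's own statement) =====
-- stated objective: faster
-- what changed: Replaces A's per-character s.count/i.count rescans with multiset containment by sorting: s is sorted and joined once, each word is sorted, and a find-driven two-pointer walk checks that the sorted word is a subsequence of the sorted s; correct because multiset containment of strings equals the subsequence relation on their sorted forms.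
import Mathlib
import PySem

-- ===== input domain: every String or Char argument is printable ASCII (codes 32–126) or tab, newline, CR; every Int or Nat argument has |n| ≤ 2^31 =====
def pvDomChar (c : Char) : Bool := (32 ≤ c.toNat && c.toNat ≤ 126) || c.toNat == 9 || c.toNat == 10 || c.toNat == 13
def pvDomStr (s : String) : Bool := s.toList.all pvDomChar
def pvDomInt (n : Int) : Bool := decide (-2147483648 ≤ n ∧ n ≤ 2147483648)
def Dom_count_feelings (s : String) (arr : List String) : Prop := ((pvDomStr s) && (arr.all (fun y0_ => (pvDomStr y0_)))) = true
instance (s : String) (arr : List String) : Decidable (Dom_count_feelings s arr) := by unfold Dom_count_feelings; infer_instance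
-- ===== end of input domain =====

-- B replaces A's per-character count rescans by sorting: sort s once, sort each word, and
-- walk the two sorted sequences with a find-driven pointer; same return value everywhere.

-- ===== PORT A =====
-- A: for each string i, a flag t is set to 1 if some char of i occurs more often in i than in s
--    (via repeated .count scans); strings with t = 0 are counted.
def count_feelings (s : String) (arr : List String) : String :=
  let c : Int := arr.foldl (fun c i =>
    let t : Int := i.toList.foldl (fun t j =>
      if PySem.Str.count s (String.singleton j) < PySem.Str.count i (String.singleton j) then 1 else t) 0
    if t = 0 then c + 1 else c) 0
  if c = 1 then "1 feeling." else PySem.Int.toStr c ++ " feelings."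

-- ===== PORT B =====
-- B: ss = ''.join(sorted(s)); per word, a pointer k walks ss: for each ch of sorted(w),
--    k = ss.find(ch, k); -1 breaks out with ok = False (the ok flag/break is the Option state).
def count_feelings_alt (s : String) (arr : List String) : String :=
  let ss := String.ofList (PySem.List.sorted s.toList (fun x => x))
  let c : Int := arr.foldl (fun c w =>
    let r : Option Int := (PySem.List.sorted w.toList (fun x => x)).foldl (fun st ch =>
      match st with
      | none => none
      | some k =>
          let k' := PySem.Str.findFrom ss (String.singleton ch) k none
          if k' = -1 then none else some (k' + 1)) (some (0 : Int))
    if r.isSome then c + 1 else c) 0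
  if c = 1 then "1 feeling." else PySem.Int.toStr c ++ " feelings."

-- ===== PRECONDITION & SPEC =====
def Spec_count_feelings (s : String) (arr : List String) (out : String) : Prop := out = count_feelings_alt s arr
instance (s : String) (arr : List String) (out : String) : Decidable (Spec_count_feelings s arr out) := by unfold Spec_count_feelings; infer_instance

-- ===== CLAIM (what is proved, stated in full; the proofs are below) =====
def Claim_equal_count_feelings : Prop := ∀ (s : String) (arr : List String), Dom_count_feelings s arr → Spec_count_feelings s arr (count_feelings s arr)

-- ===== LEMMAS AND PROOFS =====

-- proof-side model of B's walk: greedy subsequence check on plain lists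
def pvFits : List Char → List Char → Bool
  | [], _ => true
  | _ :: _, [] => false
  | a :: as, b :: bs => if b = a then pvFits as bs else pvFits (a :: as) bs

-- B's fold step, named for the lemmas below
def pvStep (cs : List Char) (st : Option Int) (ch : Char) : Option Int :=
  match st with
  | none => none
  | some j =>
      let k' := PySem.Chars.findFrom cs [ch] j none
      if k' = -1 then none else some (k' + 1)

-- counting a single-character substring is counting the character
theorem pv_count_go_singleton (c : Char) (l : List Char) (acc : Nat) :
    PySem.Chars.count.go [c] l.length l acc = acc + l.count c := by
  induction l generalizing acc with
  | nil => simp [PySem.Chars.count.go]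
  | cons h t ih =>
      by_cases hc : c = h
      · subst hc
        simp [PySem.Chars.count.go, List.isPrefixOf, ih]
        omega
      · simp [PySem.Chars.count.go, List.isPrefixOf, hc, Ne.symm hc, ih]

theorem pv_count_singleton (s : String) (c : Char) :
    PySem.Str.count s (String.singleton c) = s.toList.count c := by
  have h := pv_count_go_singleton c s.toList 0
  have hsub : (String.singleton c).toList = [c] := by simp [String.singleton]
  unfold PySem.Str.count
  rw [hsub]
  unfold PySem.Chars.count
  simpa using h

-- the inner flag loop of A: t ends 1 iff some char of the word violates the count test
theorem pv_flag_foldl (p : Char → Prop) [DecidablePred p] (l : List Char) (a : Int) :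
    l.foldl (fun t j => if p j then 1 else t) a = if ∃ j ∈ l, p j then 1 else a := by
  induction l generalizing a with
  | nil => simp
  | cons h t ih =>
      by_cases hp : p h
      · simp [hp, ih]
      · simp [hp, ih]

-- the greedy walk decides the sublist (subsequence) relation
theorem pv_fits_iff_sublist (l₂ l₁ : List Char) :
    pvFits l₁ l₂ = true ↔ List.Sublist l₁ l₂ := by
  induction l₂ generalizing l₁ with
  | nil => cases l₁ <;> simp [pvFits]
  | cons b bs ih =>
      cases l₁ with
      | nil => simp [pvFits]
      | cons a as =>
          by_cases hb : b = a
          · subst hb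
            simpa [pvFits] using ih as
          · rw [show pvFits (a :: as) (b :: bs) = pvFits (a :: as) bs by
                simp [pvFits, hb]]
            rw [ih (a :: as)]
            constructor
            · exact fun h => List.Sublist.cons b h
            · intro h
              cases h with
              | cons _ h' => exact h'
              | cons₂ => exact absurd rfl hb

theorem pv_prefix_single (l : List Char) (ch : Char) : [ch] <+: l ↔ l.head? = some ch := by
  cases l with
  | nil => simp
  | cons b bs =>
      constructor
      · rintro ⟨t, ht⟩; cases ht; simp
      · intro h; simp at h; subst h; exact ⟨bs, rfl⟩

theorem pv_fits_of_not_mem (l : List Char) (ch : Char) (q : List Char) (h : ch ∉ l) :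
    pvFits (ch :: q) l = false := by
  induction l with
  | nil => rfl
  | cons b bs ih =>
      have hb : b ≠ ch := by intro he; exact h (he ▸ List.mem_cons_self)
      simp only [pvFits, if_neg hb]
      exact ih (fun hm => h (List.mem_cons_of_mem _ hm))

-- skipping the non-matching prefix: if cs[m] is the first ch at index ≥ k,
-- the greedy check from k reduces to the check of the tail from m+1
theorem pv_fits_skip (cs : List Char) (ch : Char) (q : List Char) :
    ∀ d k m, m - k = d → k ≤ m →
      cs.drop m = ch :: cs.drop (m + 1) →
      (∀ i, k ≤ i → i < m → (cs.drop i).head? ≠ some ch) →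
      pvFits (ch :: q) (cs.drop k) = pvFits q (cs.drop (m + 1)) := by
  intro d
  induction d with
  | zero =>
      intro k m hd hkm hm _
      have : k = m := by omega
      subst this
      rw [hm]
      simp [pvFits]
  | succ n ih =>
      intro k m hd hkm hm hmin
      have hkm' : k < m := by omega
      have hmlen : m < cs.length := by
        by_contra hge
        rw [List.drop_eq_nil_of_le (by omega)] at hm
        simp at hm
      have hklen : k < cs.length := by omega
      have hdropk : cs.drop k = cs[k] :: cs.drop (k + 1) := List.drop_eq_getElem_cons hklen
      have hne : cs[k] ≠ ch := by
        intro he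
        exact hmin k le_rfl hkm' (by rw [hdropk]; simp [he])
      rw [hdropk]
      simp only [pvFits, if_neg hne]
      exact ih (k + 1) m (by omega) (by omega) hm (fun i hi him => hmin i (by omega) him)

-- the fold is absorbed by the broken-out state
theorem pv_step_none (cs : List Char) (l : List Char) :
    l.foldl (pvStep cs) none = none := by
  induction l with
  | nil => rfl
  | cons x xs ihx => simpa [pvStep] using ihx

-- B's find-driven pointer walk computes the greedy subsequence check
theorem pv_walk_eq_fits (cs : List Char) (q : List Char) :
    ∀ k : Nat, k ≤ cs.length →
      (q.foldl (pvStep cs) (some (k : Int))).isSome = pvFits q (cs.drop k) := by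
  induction q with
  | nil => intro k _; simp [pvFits]
  | cons ch q ih =>
      intro k hk
      rw [List.foldl_cons]
      by_cases hf : PySem.Chars.findFrom cs [ch] (k : Int) none = -1
      · have hnm : ch ∉ cs.drop k := by
          have := (PySem.Chars.findFrom_natCast_eq_neg_one_iff cs [ch] k hk).mp hf
          simpa [List.singleton_infix_iff] using this
        rw [pv_fits_of_not_mem _ _ _ hnm]
        rw [show pvStep cs (some (k : Int)) ch = none by simp [pvStep, hf]]
        rw [pv_step_none]
        rfl
      · obtain ⟨hge, hpre, hmin⟩ := PySem.Chars.findFrom_natCast_spec cs [ch] k hk hf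
        set f := PySem.Chars.findFrom cs [ch] (k : Int) none with hfdef
        have hf0 : (0 : Int) ≤ f := le_trans (by exact_mod_cast Nat.zero_le k) hge
        have hkle : k ≤ f.toNat := by omega
        have hdropf : cs.drop f.toNat = ch :: cs.drop (f.toNat + 1) := by
          have hh := (pv_prefix_single _ ch).mp hpre
          cases hdrop : cs.drop f.toNat with
          | nil => rw [hdrop] at hh; simp at hh
          | cons b bs =>
              rw [hdrop] at hh
              simp at hh
              subst hh
              have hbs : bs = cs.drop (f.toNat + 1) := by
                have := congrArg (List.drop 1) hdrop
                simpa [List.drop_drop, Nat.add_comm] using this.symm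
              rw [hbs]
        have hflen : f.toNat < cs.length := by
          by_contra hge2
          rw [List.drop_eq_nil_of_le (by omega)] at hdropf
          simp at hdropf
        have hstep : pvStep cs (some (k : Int)) ch = some ((f.toNat + 1 : Nat) : Int) := by
          simp only [pvStep, hfdef.symm, if_neg hf]
          congr 1
          omega
        rw [hstep, ih (f.toNat + 1) (by omega)]
        exact (pv_fits_skip cs ch q (f.toNat - k) k f.toNat rfl hkle hdropf
          (fun i hi him => by
            intro hh
            exact hmin i hi him ((pv_prefix_single _ ch).mpr hh))).symm

-- per-string agreement of A's flag test with B's walk over the sorted sequences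
theorem pv_cond_iff (s i : String) :
    ((i.toList.foldl (fun t j =>
        if PySem.Str.count s (String.singleton j) < PySem.Str.count i (String.singleton j) then 1 else t) (0 : Int)) = 0)
      ↔ (((PySem.List.sorted i.toList (fun x => x)).foldl
            (pvStep (PySem.List.sorted s.toList (fun x => x))) (some (0 : Int))).isSome = true) := by
  rw [pv_flag_foldl (fun j =>
        PySem.Str.count s (String.singleton j) < PySem.Str.count i (String.singleton j))]
  have hw := pv_walk_eq_fits (PySem.List.sorted s.toList (fun x => x))
    (PySem.List.sorted i.toList (fun x => x)) 0 (Nat.zero_le _)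
  rw [List.drop_zero] at hw
  simp only [Nat.cast_zero] at hw
  rw [hw, pv_fits_iff_sublist]
  have hpi : (PySem.List.sorted i.toList (fun x => x)).Perm i.toList := PySem.List.sorted_perm _ _ _
  have hps : (PySem.List.sorted s.toList (fun x => x)).Perm s.toList := PySem.List.sorted_perm _ _ _
  have hcount : (∀ j ∈ i.toList, i.toList.count j ≤ s.toList.count j)
      ↔ List.Sublist (PySem.List.sorted i.toList (fun x => x)) (PySem.List.sorted s.toList (fun x => x)) := by
    constructor
    · intro h
      have hsp : List.Subperm i.toList s.toList := List.subperm_ext_iff.mpr h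
      have hsp' : List.Subperm (PySem.List.sorted i.toList (fun x => x)) (PySem.List.sorted s.toList (fun x => x)) :=
        (hpi.subperm.trans hsp).trans hps.symm.subperm
      have h1 : (PySem.List.sorted i.toList (fun x => x)).Pairwise (· ≤ ·) := by
        simpa using PySem.List.sorted_pairwise i.toList (fun x : Char => x)
      have h2 : (PySem.List.sorted s.toList (fun x => x)).Pairwise (· ≤ ·) := by
        simpa using PySem.List.sorted_pairwise s.toList (fun x : Char => x)
      exact List.sublist_of_subperm_of_pairwise hsp' h1 h2
    · intro h
      have hsp : List.Subperm i.toList s.toList :=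
        (hpi.symm.subperm.trans h.subperm).trans hps.subperm
      exact List.subperm_ext_iff.mp hsp
  constructor
  · intro h
    have hnone : ¬ ∃ j ∈ i.toList,
        PySem.Str.count s (String.singleton j) < PySem.Str.count i (String.singleton j) := by
      intro hy; rw [if_pos hy] at h; omega
    refine hcount.mp (fun j hj => ?_)
    by_contra hlt
    exact hnone ⟨j, hj, by rw [pv_count_singleton, pv_count_singleton]; omega⟩
  · intro h
    have hc := hcount.mpr h
    have hnone : ¬ ∃ j ∈ i.toList,
        PySem.Str.count s (String.singleton j) < PySem.Str.count i (String.singleton j) := by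
      rintro ⟨j, hj, hjp⟩
      have := hc j hj
      rw [pv_count_singleton, pv_count_singleton] at hjp
      omega
    rw [if_neg hnone]

-- ===== VERDICT (by name: the statement is the Claim_ definition above) =====
theorem count_feelings_spec : Claim_equal_count_feelings := by
  intro s arr _
  unfold Spec_count_feelings count_feelings count_feelings_alt
  have hstep : (fun (st : Option Int) (ch : Char) =>
        match st with
        | none => none
        | some k =>
            let k' := PySem.Str.findFrom (String.ofList (PySem.List.sorted s.toList (fun x => x)))
              (String.singleton ch) k none
            if k' = -1 then none else some (k' + 1))
      = pvStep (PySem.List.sorted s.toList (fun x => x)) := by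
    funext st ch
    cases st with
    | none => rfl
    | some k =>
        simp only [pvStep, PySem.Str.findFrom_eq]
        congr 1 <;> simp
  have hfun : (fun (c : Int) (i : String) =>
        let t : Int := i.toList.foldl (fun t j =>
          if PySem.Str.count s (String.singleton j) < PySem.Str.count i (String.singleton j) then 1 else t) 0
        if t = 0 then c + 1 else c)
      = (fun (c : Int) (w : String) =>
        if ((PySem.List.sorted w.toList (fun x => x)).foldl
              (pvStep (PySem.List.sorted s.toList (fun x => x))) (some (0 : Int))).isSome
        then c + 1 else c) := by
    funext c i
    show (if (i.toList.foldl (fun t j =>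
          if PySem.Str.count s (String.singleton j) < PySem.Str.count i (String.singleton j) then 1 else t) (0 : Int)) = 0
        then c + 1 else c) = _
    by_cases hc : (i.toList.foldl (fun t j =>
        if PySem.Str.count s (String.singleton j) < PySem.Str.count i (String.singleton j) then 1 else t) (0 : Int)) = 0
    · rw [if_pos hc, if_pos (by simpa using (pv_cond_iff s i).mp hc)]
    · rw [if_neg hc, if_neg (by simpa using (pv_cond_iff s i).not.mp hc)]
  simp only [hstep]
  rw [hfun]
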